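-- pv_equiv track=rewrite | github.com/prosvirinKir/Computational-biology | mutation_search.py | _right_expand_sequence
-- ===== SOURCE A (Python) =====
-- from typing import Dict, List, OrderedDict, Tuple
--
-- def _right_expand_sequence(
--         original: str,
--         sequences: List[str],
--         expended_size: int = 50
--     ) -> str:
--     expanded = original
--     while len(expanded) < expended_size:
--         for kmer in sequences:
--             overlap_pos = len(expanded) - len(kmer) + 1
--             if expanded[overlap_pos:] == kmer[:-1]:
--                 expanded += kmer[-1]
--                 break
--     return expanded
-- ===== SOURCE B (Python) =====
-- def _right_expand_sequence(original, sequences, expended_size=50):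
--     # Index kmers once: prefix -> (first index, last char); distinct kmer lengths.
--     # Per step, one dict lookup per distinct length replaces the scan over all kmers.
--     best = {}
--     lengths = []
--     for i, kmer in enumerate(sequences):
--         if not kmer:
--             continue
--         p = kmer[:-1]
--         if p not in best:
--             best[p] = (i, kmer[-1])
--         if len(kmer) not in lengths:
--             lengths.append(len(kmer))
--     expanded = original
--     while len(expanded) < expended_size:
--         n = len(expanded)
--         cands = [best[expanded[n - L + 1:]] for L in lengths
--                  if L - 1 <= n and expanded[n - L + 1:] in best]
--         if not cands:
--             break
--         expanded += min(cands, key=lambda t: t[0])[1]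
--     return expanded
-- ===== Notes on version B (the rewrite author's own statement) =====
-- stated objective: alternative
-- what changed: B builds a one-time index (kmer-prefix -> first index and last char, plus the distinct kmer lengths) and each extension step does one dict lookup per distinct kmer length instead of re-slicing and comparing every kmer; the index build is paid once, so B trades A's per-step list scan for an upfront O(total kmer size) indexing pass.
-- outside the precondition, e.g. on _right_expand_sequence('a', ['zz'], 5): A does not finish within the time limit, B returns 'a'; on _right_expand_sequence('a', ['b', ''], 3): A returns 'abb', B returns 'abb'; on _right_expand_sequence('a', ['ab', 'bc', 'zq'], 3): A returns 'abc', B returns 'abc'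
import Mathlib
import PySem

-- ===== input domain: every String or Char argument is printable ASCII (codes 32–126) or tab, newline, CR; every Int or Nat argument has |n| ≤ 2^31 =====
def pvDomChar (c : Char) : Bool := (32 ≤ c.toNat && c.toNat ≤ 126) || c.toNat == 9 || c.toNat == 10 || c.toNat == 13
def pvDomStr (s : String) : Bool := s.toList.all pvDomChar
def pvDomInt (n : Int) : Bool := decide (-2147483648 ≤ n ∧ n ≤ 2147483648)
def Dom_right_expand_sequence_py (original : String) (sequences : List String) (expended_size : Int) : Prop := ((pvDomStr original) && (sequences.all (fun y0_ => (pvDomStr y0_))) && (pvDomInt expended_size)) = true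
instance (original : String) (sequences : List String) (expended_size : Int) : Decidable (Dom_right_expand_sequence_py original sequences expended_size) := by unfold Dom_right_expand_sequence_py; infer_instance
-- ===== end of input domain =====

-- B replaces A's per-step scan of all kmers by a one-time index (kmer-prefix -> first index & last char,
-- plus the list of distinct kmer lengths), so each extension step does one dict lookup per distinct length.

-- ===== PORT A =====
-- 'for kmer in sequences: if expanded[overlap_pos:] == kmer[:-1]: … break' — first matching kmer
def pvA_find (e : List Char) : List (List Char) → Option (List Char)
  | [] => none
  | k :: rest =>
    if PySem.List.slice e (some ((e.length : Int) - (k.length : Int) + 1)) none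
        = PySem.List.slice k none (some (-1))
    then some k
    else pvA_find e rest

-- the 'while len(expanded) < expended_size' loop; each iteration appends exactly one char, so the
-- fuel (expended_size - len(original)) counts the iterations exactly.  The 'none' branches are the
-- inputs Pre_ excludes: no matching kmer (Python spins forever) / empty kmer (kmer[-1] raises).
def pvA_loop (seqs : List (List Char)) : Nat → List Char → List Char
  | 0, e => e
  | fuel+1, e =>
    match pvA_find e seqs with
    | none => e
    | some k =>
      match k.getLast? with
      | none => e
      | some c => pvA_loop seqs fuel (e ++ [c])

def right_expand_sequence_py (original : String) (sequences : List String) (expended_size : Int) : String :=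
  let e0 := original.toList
  String.ofList (pvA_loop (sequences.map String.toList) (expended_size - (e0.length : Int)).toNat e0)

-- ===== PORT B =====
-- first loop of Source B: best = {prefix: (first index, last char)}, lengths = distinct kmer lengths
def pvB_build (seqs : List (List Char)) : PySem.Dict (List Char) (Int × Char) × List Nat :=
  (PySem.List.enumerate seqs 0).foldl
    (fun st ik =>
      match ik.2.getLast? with
      | none => st      -- 'if not kmer: continue'
      | some c =>
        let p := PySem.List.slice ik.2 none (some (-1))
        ((if (st.1.get? p).isSome then st.1 else st.1.insert p (ik.1, c)),
         (if ik.2.length ∈ st.2 then st.2 else st.2 ++ [ik.2.length])))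
    (PySem.Dict.empty, [])

-- the list comprehension 'cands = [best[expanded[n-L+1:]] for L in lengths if L-1 <= n and … in best]'
def pvB_cands (best : PySem.Dict (List Char) (Int × Char)) (lengths : List Nat) (e : List Char) :
    List (Int × Char) :=
  lengths.filterMap (fun (L : Nat) =>
    if (L : Int) - 1 ≤ (e.length : Int) then
      best.get? (PySem.List.slice e (some ((e.length : Int) - (L : Int) + 1)) none)
    else none)

-- Source B's while loop: append min(cands, key=fst)'s char, break when no candidate
def pvB_loop (best : PySem.Dict (List Char) (Int × Char)) (lengths : List Nat) :
    Nat → List Char → List Char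
  | 0, e => e
  | fuel+1, e =>
    match PySem.List.min? (pvB_cands best lengths e) (fun t => t.1) with
    | none => e
    | some t => pvB_loop best lengths fuel (e ++ [t.2])

def right_expand_sequence_py_alt (original : String) (sequences : List String) (expended_size : Int) : String :=
  let st := pvB_build (sequences.map String.toList)
  let e0 := original.toList
  String.ofList (pvB_loop st.1 st.2 (expended_size - (e0.length : Int)).toNat e0)

-- ===== PRECONDITION & SPEC =====
-- Pre_ excludes inputs on which Python A never returns a value: an empty kmer makes A raise IndexError
-- on kmer[-1] when it is the first match, and if at some step no kmer's prefix overlaps the current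
-- suffix the while-loop rescans forever.  Pre_ guarantees progress in closed form — no empty kmer, some
-- kmer's prefix is a suffix of the original, and every kmer is itself extendable by some kmer (after a
-- step the string ends with the chosen kmer) — which is conservative: it also omits some terminating
-- inputs where a never-reached kmer has no extender, or where an empty kmer is shielded by earlier
-- always-matching kmers (see the cited examples).
def Pre_right_expand_sequence_py (original : String) (sequences : List String) (expended_size : Int) : Prop :=
  expended_size ≤ (original.toList.length : Int) ∨
    ("" ∉ sequences ∧
     (∃ k ∈ sequences, k.toList.length ≤ original.toList.length + 1 ∧
        k.toList.dropLast.isSuffixOf original.toList = true) ∧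
     (∀ k ∈ sequences, ∃ k' ∈ sequences, k'.toList.length ≤ k.toList.length + 1 ∧
        k'.toList.dropLast.isSuffixOf k.toList = true))
instance (original : String) (sequences : List String) (expended_size : Int) : Decidable (Pre_right_expand_sequence_py original sequences expended_size) := by unfold Pre_right_expand_sequence_py; infer_instance

def pvWitness_right_expand_sequence_py : String × List String × Int := ("ab", ["bc", "cb"], 6)

def Spec_right_expand_sequence_py (original : String) (sequences : List String) (expended_size : Int) (out : String) : Prop := out = right_expand_sequence_py_alt original sequences expended_size
instance (original : String) (sequences : List String) (expended_size : Int) (out : String) : Decidable (Spec_right_expand_sequence_py original sequences expended_size out) := by unfold Spec_right_expand_sequence_py; infer_instance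

-- ===== CLAIM (what is proved, stated in full; the proofs are below) =====
def Claim_equal_right_expand_sequence_py : Prop := ∀ (original : String) (sequences : List String) (expended_size : Int), Dom_right_expand_sequence_py original sequences expended_size → Pre_right_expand_sequence_py original sequences expended_size → Spec_right_expand_sequence_py original sequences expended_size (right_expand_sequence_py original sequences expended_size)

-- ===== LEMMAS AND PROOFS =====

-- proof-side: the 'kmer matches the current suffix' condition, in arithmetic form
def pvMt (e k : List Char) : Prop :=
  k.length - 1 ≤ e.length ∧ e.drop (e.length - (k.length - 1)) = k.dropLast

-- proof-side: (p ↦ (i, c)) is exactly the entry Source B's index stores for prefix p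
def pvEntry (seqs : List (List Char)) (p : List Char) (i : Int) (c : Char) : Prop :=
  ∃ j : Nat, (j : Int) = i ∧ ∃ h : j < seqs.length,
    seqs[j].dropLast = p ∧ seqs[j].getLast? = some c ∧
    ∀ l, (hl : l < seqs.length) → l < j → seqs[l].dropLast ≠ p

theorem pvA_cond_iff (e k : List Char) (hk : k ≠ []) :
    (PySem.List.slice e (some ((e.length : Int) - (k.length : Int) + 1)) none
      = PySem.List.slice k none (some (-1))) ↔ pvMt e k := by
  have hk1 : 1 ≤ k.length := List.length_pos_iff.mpr hk
  rw [PySem.List.slice_to_neg_one, PySem.List.slice_some_none]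
  by_cases h : k.length - 1 ≤ e.length
  · have ha : (e.length : Int) - (k.length : Int) + 1 = ((e.length - (k.length - 1) : Nat) : Int) := by
      omega
    rw [ha, PySem.List.clampIdx_natCast]
    have : min (e.length - (k.length - 1)) e.length = e.length - (k.length - 1) := by omega
    rw [this]
    unfold pvMt
    tauto
  · constructor
    · intro heq
      exfalso
      have hlen := congrArg List.length heq
      simp [List.length_drop] at hlen
      have hc : PySem.List.clampIdx e.length ((e.length : Int) - (k.length : Int) + 1) ≤ e.length := by
        unfold PySem.List.clampIdx
        split_ifs <;> omega
      omega
    · intro hm; exact absurd hm.1 h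

theorem pvA_find_none (e : List Char) (seqs : List (List Char)) :
    pvA_find e seqs = none ↔ ∀ k ∈ seqs,
      ¬ (PySem.List.slice e (some ((e.length : Int) - (k.length : Int) + 1)) none
          = PySem.List.slice k none (some (-1))) := by
  induction seqs with
  | nil => simp [pvA_find]
  | cons k rest ih =>
    unfold pvA_find
    split_ifs with h
    · simp [h]
    · simp [ih, h]

theorem pvA_find_some (e : List Char) (seqs : List (List Char)) (k : List Char)
    (h : pvA_find e seqs = some k) :
    ∃ j : Nat, ∃ hj : j < seqs.length, seqs[j] = k ∧
      (PySem.List.slice e (some ((e.length : Int) - (k.length : Int) + 1)) none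
        = PySem.List.slice k none (some (-1))) ∧
      ∀ l, (hl : l < seqs.length) → l < j →
        ¬ (PySem.List.slice e (some ((e.length : Int) - (seqs[l].length : Int) + 1)) none
            = PySem.List.slice seqs[l] none (some (-1))) := by
  induction seqs with
  | nil => simp [pvA_find] at h
  | cons k0 rest ih =>
    rw [pvA_find] at h
    split_ifs at h with hc
    · cases h
      exact ⟨0, by simp, rfl, hc, by omega⟩
    · obtain ⟨j, hj, hjk, hcond, hbefore⟩ := ih h
      refine ⟨j + 1, by simpa using hj, by simpa using hjk, hcond, ?_⟩
      intro l hl hlt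
      cases l with
      | zero => simpa using hc
      | succ m =>
        have hm : m < rest.length := by simpa using hl
        simpa using hbefore m hm (by omega)

theorem pvB_build_append (seqs : List (List Char)) (k : List Char) :
    pvB_build (seqs ++ [k]) =
      match k.getLast? with
      | none => pvB_build seqs
      | some c =>
        ((if ((pvB_build seqs).1.get? k.dropLast).isSome then (pvB_build seqs).1
          else (pvB_build seqs).1.insert k.dropLast ((seqs.length : Int), c)),
         (if k.length ∈ (pvB_build seqs).2 then (pvB_build seqs).2
          else (pvB_build seqs).2 ++ [k.length])) := by
  unfold pvB_build
  rw [PySem.List.enumerate_append, List.foldl_append]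
  simp [PySem.List.enumerate, PySem.List.slice_to_neg_one]

theorem pvExists_first (P : Nat → Prop) [DecidablePred P] (h : ∃ j, P j) :
    ∃ j, P j ∧ ∀ l, l < j → ¬ P l :=
  ⟨Nat.find h, Nat.find_spec h, fun l hl => Nat.find_min h hl⟩

theorem pvEntry_extend (seqs : List (List Char)) (k p : List Char) (i : Int) (c : Char)
    (h : pvEntry seqs p i c) : pvEntry (seqs ++ [k]) p i c := by
  obtain ⟨j, hji, hj, hjp, hjl, hbef⟩ := h
  refine ⟨j, hji, by simp; omega, ?_, ?_, ?_⟩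
  · rwa [List.getElem_append_left hj]
  · rwa [List.getElem_append_left hj]
  · intro l hl hlj
    have hl' : l < seqs.length := by omega
    rw [List.getElem_append_left hl']
    exact hbef l hl' hlj

theorem pvEntry_restrict (seqs : List (List Char)) (k p : List Char) (i : Int) (c : Char)
    (h : pvEntry (seqs ++ [k]) p i c) :
    (i = (seqs.length : Int) ∧ k.dropLast = p ∧ k.getLast? = some c ∧
      ∀ l, (hl : l < seqs.length) → seqs[l].dropLast ≠ p) ∨ pvEntry seqs p i c := by
  obtain ⟨j, hji, hj, hjp, hjl, hbef⟩ := h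
  rcases Nat.lt_or_ge j seqs.length with hlt | hge
  · right
    refine ⟨j, hji, hlt, ?_, ?_, ?_⟩
    · rwa [List.getElem_append_left hlt] at hjp
    · rwa [List.getElem_append_left hlt] at hjl
    · intro l hl hlj
      have := hbef l (by simp; omega) hlj
      rwa [List.getElem_append_left hl] at this
  · left
    have hj' : j = seqs.length := by simp at hj; omega
    subst hj'
    rw [List.getElem_concat_length rfl] at hjp hjl
    refine ⟨hji.symm, hjp, hjl, ?_⟩
    intro l hl
    have := hbef l (by simp; omega) (by omega)
    rwa [List.getElem_append_left hl] at this

theorem pvB_build_best (seqs : List (List Char)) : (∀ k ∈ seqs, k ≠ []) →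
    ∀ (p : List Char) (i : Int) (c : Char),
    ((pvB_build seqs).1.get? p = some (i, c) ↔ pvEntry seqs p i c) := by
  induction seqs using List.reverseRecOn with
  | nil =>
    intro hne p i c
    constructor
    · intro h; simp [pvB_build, PySem.List.enumerate] at h
    · rintro ⟨j, _, hj, _⟩; simp at hj
  | append_singleton seqs k ih =>
    intro hne p i c
    have hk : k ≠ [] := hne k (by simp)
    have hne' : ∀ k' ∈ seqs, k' ≠ [] := fun k' h => hne k' (by simp [h])
    obtain ⟨c0, hc0⟩ := Option.ne_none_iff_exists'.mp (fun h => hk (List.getLast?_eq_none_iff.mp h))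
    rw [pvB_build_append, hc0]
    have ihp := ih hne' p i c
    -- whether some earlier kmer already has prefix k.dropLast
    by_cases hold : ((pvB_build seqs).1.get? k.dropLast).isSome
    · -- old entry exists: dict unchanged
      simp only [hold, if_true]
      obtain ⟨⟨i0, c1⟩, hi0⟩ := Option.isSome_iff_exists.mp hold
      obtain ⟨j0, _, hj0, hj0p, _, _⟩ := (ih hne' _ _ _).mp hi0
      rw [ihp]
      constructor
      · rintro ⟨j, hji, hj, hjp, hjl, hbef⟩
        refine ⟨j, hji, by simp; omega, ?_, ?_, ?_⟩
        · rwa [List.getElem_append_left hj]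
        · rwa [List.getElem_append_left hj]
        · intro l hl hlj
          have hl' : l < seqs.length := by omega
          rw [List.getElem_append_left hl']
          exact hbef l hl' hlj
      · rintro ⟨j, hji, hj, hjp, hjl, hbef⟩
        have hjlen : j < seqs.length := by
          rcases Nat.lt_or_ge j seqs.length with h | h
          · exact h
          · exfalso
            have hj' : j = seqs.length := by
              have := hj; simp only [List.length_append, List.length_cons, List.length_nil] at this
              omega
            subst hj'
            rw [List.getElem_concat_length rfl] at hjp
            have := hbef j0 (by simp; omega) (by omega)
            rw [List.getElem_append_left hj0] at this
            exact this (hj0p.trans hjp)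
        refine ⟨j, hji, hjlen, ?_, ?_, ?_⟩
        · rwa [List.getElem_append_left hjlen] at hjp
        · rwa [List.getElem_append_left hjlen] at hjl
        · intro l hl hlj
          have := hbef l (by simp; omega) hlj
          rwa [List.getElem_append_left hl] at this
    · -- fresh prefix: dict gains (k.dropLast ↦ (len, c0))
      simp only [hold, if_false, Bool.false_eq_true]
      have hnone : (pvB_build seqs).1.get? k.dropLast = none := by
        cases h : (pvB_build seqs).1.get? k.dropLast with
        | none => rfl
        | some v => rw [h] at hold; simp at hold
      have hnoprev : ∀ l, (hl : l < seqs.length) → seqs[l].dropLast ≠ k.dropLast := by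
        intro l hl hlp
        have hex : ∃ l', (seqs[l']?.map List.dropLast) = some k.dropLast := ⟨l, by simp [List.getElem?_eq_getElem hl, hlp]⟩
        obtain ⟨l', hl', hfirst⟩ := pvExists_first _ hex
        have hl'len : l' < seqs.length := by
          by_contra hge
          rw [List.getElem?_eq_none_iff.mpr (by omega)] at hl'
          simp at hl'
        rw [List.getElem?_eq_getElem hl'len] at hl'
        simp at hl'
        have hkne : seqs[l'] ≠ [] := hne' _ (List.getElem_mem hl'len)
        obtain ⟨c2, hc2⟩ := Option.ne_none_iff_exists'.mp (fun h => hkne (List.getLast?_eq_none_iff.mp h))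
        have : (pvB_build seqs).1.get? k.dropLast = some ((l' : Int), c2) := by
          rw [ih hne' _ _ _]
          refine ⟨l', rfl, hl'len, hl', hc2, ?_⟩
          intro m hm hml hmp
          exact hfirst m hml (by simp [List.getElem?_eq_getElem hm, hmp])
        rw [this] at hnone; cases hnone
      rw [PySem.Dict.get?_insert]
      by_cases hpk : p = k.dropLast
      · subst hpk
        rw [if_pos rfl]
        constructor
        · intro h
          obtain ⟨h1, h2⟩ := Prod.mk.injEq .. ▸ Option.some.inj h
          refine ⟨seqs.length, h1, by simp, ?_, ?_, ?_⟩
          · rw [List.getElem_concat_length rfl]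
          · rw [List.getElem_concat_length rfl, hc0, h2]
          · intro l hl hlj
            have hl' : l < seqs.length := by omega
            rw [List.getElem_append_left hl']
            exact hnoprev l hl'
        · intro h
          rcases pvEntry_restrict _ _ _ _ _ h with ⟨h1, _, h3, _⟩ | h'
          · rw [hc0] at h3
            rw [h1, Option.some.inj h3]
          · exfalso
            obtain ⟨j, _, hj, hjp, _, _⟩ := h'
            exact hnoprev j hj hjp
      · rw [if_neg hpk, ihp]
        constructor
        · exact pvEntry_extend _ _ _ _ _
        · intro h
          rcases pvEntry_restrict _ _ _ _ _ h with ⟨_, h2, _, _⟩ | h'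
          · exact absurd h2.symm hpk
          · exact h'

theorem pvB_build_lengths (seqs : List (List Char)) (hne : ∀ k ∈ seqs, k ≠ []) (L : Nat) :
    L ∈ (pvB_build seqs).2 ↔ ∃ k ∈ seqs, k.length = L := by
  induction seqs using List.reverseRecOn with
  | nil => simp [pvB_build, PySem.List.enumerate]
  | append_singleton seqs k ih =>
    have hk : k ≠ [] := hne k (by simp)
    have hne' : ∀ k' ∈ seqs, k' ≠ [] := fun k' h => hne k' (by simp [h])
    obtain ⟨c0, hc0⟩ := Option.ne_none_iff_exists'.mp (fun h => hk (List.getLast?_eq_none_iff.mp h))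
    rw [pvB_build_append, hc0]
    by_cases hmem : k.length ∈ (pvB_build seqs).2
    · simp only [hmem, if_true]
      rw [ih hne']
      constructor
      · rintro ⟨k', hk', hkl⟩; exact ⟨k', by simp [hk'], hkl⟩
      · rintro ⟨k', hk', hkl⟩
        rcases List.mem_append.mp hk' with h | h
        · exact ⟨k', h, hkl⟩
        · have : k' = k := by simpa using h
          subst this
          subst hkl
          exact (ih hne').mp hmem
    · simp only [hmem, if_false, Bool.false_eq_true, List.mem_append, List.mem_singleton]
      rw [ih hne']
      constructor
      · rintro (⟨k', hk', hkl⟩ | h)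
        · exact ⟨k', by simp [hk'], hkl⟩
        · exact ⟨k, by simp, h.symm⟩
      · rintro ⟨k', hk', hkl⟩
        rcases hk' with h | h
        · exact Or.inl ⟨k', h, hkl⟩
        · subst h; exact Or.inr hkl.symm

theorem pvB_cands_mem (seqs : List (List Char)) (hne : ∀ k ∈ seqs, k ≠ []) (e : List Char)
    (i : Int) (c : Char) :
    (i, c) ∈ pvB_cands (pvB_build seqs).1 (pvB_build seqs).2 e ↔
      ∃ j : Nat, (j : Int) = i ∧ ∃ h : j < seqs.length,
        pvMt e seqs[j] ∧ seqs[j].getLast? = some c ∧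
        ∀ l, (hl : l < seqs.length) → l < j → seqs[l].dropLast ≠ seqs[j].dropLast := by
  unfold pvB_cands
  rw [List.mem_filterMap]
  constructor
  · rintro ⟨L, hL, hf⟩
    split_ifs at hf with hLe
    · -- hf : get? (slice …) = some (i, c)
      have hkey : PySem.List.slice e (some ((e.length : Int) - (L : Int) + 1)) none
          = e.drop (e.length - (L - 1)) := by
        obtain ⟨k0, hk0, hk0l⟩ := (pvB_build_lengths seqs hne L).mp hL
        have hL1 : 1 ≤ L := hk0l ▸ List.length_pos_iff.mpr (hne _ hk0)
        have ha : (e.length : Int) - (L : Int) + 1 = ((e.length - (L - 1) : Nat) : Int) := by omega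
        rw [ha, PySem.List.slice_from_natCast]
      rw [hkey] at hf
      obtain ⟨j, hji, hj, hjp, hjl, hbef⟩ := (pvB_build_best seqs hne _ i c).mp hf
      obtain ⟨k0, hk0, hk0l⟩ := (pvB_build_lengths seqs hne L).mp hL
      have hL1 : 1 ≤ L := hk0l ▸ List.length_pos_iff.mpr (hne _ hk0)
      have hjne : seqs[j] ≠ [] := hne _ (List.getElem_mem hj)
      have hjlen : seqs[j].length = L := by
        have := congrArg List.length hjp
        simp [List.length_dropLast, List.length_drop] at this
        have h1 : seqs[j].length ≥ 1 := List.length_pos_iff.mpr hjne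
        omega
      refine ⟨j, hji, hj, ⟨by omega, by rw [hjlen]; exact hjp.symm⟩, hjl, ?_⟩
      intro l hl hlj
      rw [hjp]
      exact hbef l hl hlj
  · rintro ⟨j, hji, hj, ⟨hm1, hm2⟩, hjl, hbef⟩
    have hjne : seqs[j] ≠ [] := hne _ (List.getElem_mem hj)
    have hL1 : 1 ≤ seqs[j].length := List.length_pos_iff.mpr hjne
    refine ⟨seqs[j].length, (pvB_build_lengths seqs hne _).mpr ⟨seqs[j], List.getElem_mem hj, rfl⟩, ?_⟩
    rw [if_pos (by omega)]
    have ha : (e.length : Int) - (seqs[j].length : Int) + 1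
        = ((e.length - (seqs[j].length - 1) : Nat) : Int) := by omega
    rw [ha, PySem.List.slice_from_natCast]
    rw [pvB_build_best seqs hne]
    exact ⟨j, hji, hj, hm2.symm, hjl, fun l hl hlj => hm2 ▸ hbef l hl hlj⟩

theorem pvStep (seqs : List (List Char)) (hne : ∀ k ∈ seqs, k ≠ []) (e : List Char) :
    (pvA_find e seqs = none ∧
       PySem.List.min? (pvB_cands (pvB_build seqs).1 (pvB_build seqs).2 e) (fun t => t.1) = none) ∨
    (∃ k c, pvA_find e seqs = some k ∧ k.getLast? = some c ∧
       ∃ i, PySem.List.min? (pvB_cands (pvB_build seqs).1 (pvB_build seqs).2 e) (fun t => t.1)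
              = some (i, c)) := by
  cases h : pvA_find e seqs with
  | none =>
    left
    refine ⟨rfl, ?_⟩
    rw [PySem.List.min?_eq_none_iff]
    rw [List.eq_nil_iff_forall_not_mem]
    rintro ⟨i, c⟩ hx
    obtain ⟨j, hji, hj, hm, hjl, hbef⟩ := (pvB_cands_mem seqs hne e i c).mp hx
    have hjne : seqs[j] ≠ [] := hne _ (List.getElem_mem hj)
    exact (pvA_find_none e seqs).mp h seqs[j] (List.getElem_mem hj)
      ((pvA_cond_iff e seqs[j] hjne).mpr hm)
  | some k =>
    right
    obtain ⟨j, hj, hjk, hcond, hbef⟩ := pvA_find_some e seqs k h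
    have hkmem : k ∈ seqs := hjk ▸ List.getElem_mem hj
    have hkne : k ≠ [] := hne _ hkmem
    obtain ⟨c, hc⟩ := Option.ne_none_iff_exists'.mp
      (fun hh => hkne (List.getLast?_eq_none_iff.mp hh))
    have hmt : pvMt e seqs[j] := (pvA_cond_iff e k hkne).mp hcond |>.imp
      (by rw [hjk]; exact id) (by rw [hjk]; exact id)
    have hjc : ((j : Int), c) ∈ pvB_cands (pvB_build seqs).1 (pvB_build seqs).2 e := by
      rw [pvB_cands_mem seqs hne]
      refine ⟨j, rfl, hj, hmt, by rw [hjk]; exact hc, ?_⟩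
      intro l hl hlj hdrop
      have hlne : seqs[l] ≠ [] := hne _ (List.getElem_mem hl)
      have hlen : seqs[l].length = seqs[j].length := by
        have := congrArg List.length hdrop
        simp [List.length_dropLast] at this
        have h1 : 1 ≤ seqs[l].length := List.length_pos_iff.mpr hlne
        have h2 : 1 ≤ seqs[j].length := List.length_pos_iff.mpr (hne _ (List.getElem_mem hj))
        omega
      have hmtl : pvMt e seqs[l] := ⟨by rw [hlen]; exact hmt.1, by rw [hlen, hdrop]; exact hmt.2⟩
      exact hbef l hl hlj ((pvA_cond_iff e seqs[l] hlne).mpr hmtl)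
    have hnonnil : pvB_cands (pvB_build seqs).1 (pvB_build seqs).2 e ≠ [] :=
      List.ne_nil_of_mem hjc
    cases hmin : PySem.List.min? (pvB_cands (pvB_build seqs).1 (pvB_build seqs).2 e) (fun t => t.1) with
    | none => exact absurd ((PySem.List.min?_eq_none_iff _ _).mp hmin) hnonnil
    | some m =>
      have hmmem := PySem.List.min?_mem hmin
      have hmin' := PySem.List.min?_isMin hmin
      obtain ⟨j', hj'i, hj', hm', hjl', hbef'⟩ := (pvB_cands_mem seqs hne e m.1 m.2).mp (by
        simpa using hmmem)
      have hj'ge : j ≤ j' := by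
        by_contra hlt
        push_neg at hlt
        have hj'ne : seqs[j'] ≠ [] := hne _ (List.getElem_mem hj')
        exact hbef j' hj' hlt ((pvA_cond_iff e seqs[j'] hj'ne).mpr hm')
      have hle : m.1 ≤ (j : Int) := hmin' _ hjc
      have hjj' : j' = j := by omega
      subst hjj'
      have hcm : m.2 = c := by
        rw [hjk, hc] at hjl'
        exact (Option.some.inj hjl').symm
      refine ⟨k, c, rfl, hc, m.1, ?_⟩
      rw [← hcm]

theorem pvLoop_eq (seqs : List (List Char)) (hne : ∀ k ∈ seqs, k ≠ []) (fuel : Nat) (e : List Char) :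
    pvA_loop seqs fuel e = pvB_loop (pvB_build seqs).1 (pvB_build seqs).2 fuel e := by
  induction fuel generalizing e with
  | zero => rfl
  | succ fuel ih =>
    rw [pvA_loop, pvB_loop]
    rcases pvStep seqs hne e with ⟨h1, h2⟩ | ⟨k, c, h1, h2, i, h3⟩
    · simp only [h1, h2]
    · simp only [h1, h2, h3]
      exact ih (e ++ [c])

-- ===== VERDICT (by name: the statement is the Claim_ definition above) =====
theorem right_expand_sequence_py_spec : Claim_equal_right_expand_sequence_py := by
  intro original sequences expended_size _ hpre
  unfold Spec_right_expand_sequence_py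
  unfold right_expand_sequence_py right_expand_sequence_py_alt
  rcases hpre with h | h
  · have h0 : (expended_size - (original.toList.length : Int)).toNat = 0 := by omega
    simp only [h0]
    rfl
  · have hne : ∀ k ∈ sequences.map String.toList, k ≠ [] := by
      intro k hk
      rcases List.mem_map.mp hk with ⟨s, hs, rfl⟩
      intro hnil
      exact h.1 (String.toList_eq_nil_iff.mp hnil ▸ hs)
    simp only [pvLoop_eq (sequences.map String.toList) hne]
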